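-- pv_equiv track=rewrite | github.com/abd-khrubi/Snake-AI | util.py | compactness
-- ===== SOURCE A (Python) =====
-- def compactness(snake):
--     compactness = 0
--     for i in range(len(snake)):
--         for j in range(i + 1, len(snake)):
--             if ((abs(snake[i][0] - snake[j][0]) == 1) and (abs(snake[i][1] - snake[j][1]) == 0) or
--                     (abs(snake[i][0] - snake[j][0]) == 0) and (abs(snake[i][1] - snake[j][1]) == 1)):
--                 compactness += 1
--
--     return -compactness
-- ===== SOURCE B (Python) =====
-- def compactness(snake):
--     count = {}
--     for cell in snake:
--         count[cell] = count.get(cell, 0) + 1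
--     adj = 0
--     for (x, y), c in count.items():
--         adj += c * count.get((x + 1, y), 0) + c * count.get((x, y + 1), 0)
--     return -adj
-- ===== Notes on version B (the rewrite author's own statement) =====
-- stated objective: faster
-- what changed: replaces the all-pairs O(n^2) index scan with a one-pass occurrence counter and a sum of count[c]*count[right(c)] + count[c]*count[above(c)] over distinct cells
import Mathlib
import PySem

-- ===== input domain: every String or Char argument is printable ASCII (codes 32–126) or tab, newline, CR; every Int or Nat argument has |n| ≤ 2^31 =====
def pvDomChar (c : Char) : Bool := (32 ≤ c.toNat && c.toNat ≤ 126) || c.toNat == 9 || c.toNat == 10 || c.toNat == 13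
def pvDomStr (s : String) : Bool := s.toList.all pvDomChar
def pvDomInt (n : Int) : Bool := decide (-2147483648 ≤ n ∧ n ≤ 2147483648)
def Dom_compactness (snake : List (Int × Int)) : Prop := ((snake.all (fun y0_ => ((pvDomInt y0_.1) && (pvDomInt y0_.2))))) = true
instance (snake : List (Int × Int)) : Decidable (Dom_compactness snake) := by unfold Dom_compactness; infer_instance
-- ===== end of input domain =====

-- B replaces A's all-pairs scan by a single-pass occurrence counter and a grouped sum
-- count[c]*count[c+(1,0)] + count[c]*count[c+(0,1)] over the distinct cells (faster).

-- ===== PORT A =====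
-- the adjacency test of A's inner 'if', literal
def adjCond (a b : Int × Int) : Bool :=
  ((a.1 - b.1).natAbs == 1 && (a.2 - b.2).natAbs == 0) ||
  ((a.1 - b.1).natAbs == 0 && (a.2 - b.2).natAbs == 1)

def compactness (snake : List (Int × Int)) : Int :=
  -((PySem.List.pyRange 0 (PySem.List.len snake) 1).foldl (fun acc i =>
      (PySem.List.pyRange (i + 1) (PySem.List.len snake) 1).foldl (fun acc2 j =>
        if adjCond (PySem.List.pyGetD snake i (0, 0)) (PySem.List.pyGetD snake j (0, 0))
        then acc2 + 1 else acc2) acc) 0)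

-- ===== PORT B =====
def compactness_alt (snake : List (Int × Int)) : Int :=
  let count : PySem.Dict (Int × Int) Int :=
    snake.foldl (fun d cell => d.insert cell (d.getD cell 0 + 1)) PySem.Dict.empty
  let adj : Int := count.items.foldl (fun acc p =>
      acc + (p.2 * count.getD (p.1.1 + 1, p.1.2) 0 + p.2 * count.getD (p.1.1, p.1.2 + 1) 0)) 0;
  -adj

-- ===== PRECONDITION & SPEC =====
def Spec_compactness (snake : List (Int × Int)) (out : Int) : Prop := out = compactness_alt snake
instance (snake : List (Int × Int)) (out : Int) : Decidable (Spec_compactness snake out) := by unfold Spec_compactness; infer_instance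

-- ===== CLAIM (what is proved, stated in full; the proofs are below) =====
def Claim_equal_compactness : Prop := ∀ (snake : List (Int × Int)), Dom_compactness snake → Spec_compactness snake (compactness snake)

-- ===== LEMMAS AND PROOFS =====

-- the four orthogonal neighbours of a cell
def rC (a : Int × Int) : Int × Int := (a.1 + 1, a.2)
def uC (a : Int × Int) : Int × Int := (a.1, a.2 + 1)
def lC (a : Int × Int) : Int × Int := (a.1 - 1, a.2)
def dC (a : Int × Int) : Int × Int := (a.1, a.2 - 1)

-- structural form of A's pair count (head cell vs tail, then recurse)
def pairSum : List (Int × Int) → Nat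
  | [] => 0
  | a :: t => t.countP (fun b => adjCond a b) + pairSum t

-- the adjacency test counts exactly the four orthogonal neighbours
theorem countP_adj (a : Int × Int) (t : List (Int × Int)) :
    t.countP (fun b => adjCond a b) =
      t.count (rC a) + t.count (lC a) + t.count (uC a) + t.count (dC a) := by
  induction t with
  | nil => simp
  | cons b t ih =>
    simp only [List.countP_cons, List.count_cons, ih]
    rcases a with ⟨ax, ay⟩; rcases b with ⟨bx, by'⟩
    simp only [adjCond, rC, uC, lC, dC, Prod.mk.injEq, beq_iff_eq, Bool.and_eq_true,
      Bool.or_eq_true]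
    split_ifs <;> simp_all <;> omega

theorem sumIdx (xs : List (Int × Int)) :
    ((List.range xs.length).map (fun k =>
      (((xs.drop (k + 1)).countP (fun b => adjCond (xs.getD k (0, 0)) b) : Nat) : Int))).sum
      = (pairSum xs : Int) := by
  induction xs with
  | nil => simp [pairSum]
  | cons a t ih =>
    rw [List.length_cons, List.range_succ_eq_map, List.map_cons, List.map_map, List.sum_cons]
    simp only [Function.comp_def, List.drop_succ_cons, List.getD_cons_succ, List.getD_cons_zero,
      List.drop_zero, ih, pairSum]
    push_cast
    ring

-- A's nested index loops compute -(pairSum snake)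
theorem A_eq (snake : List (Int × Int)) : compactness snake = -(pairSum snake : Int) := by
  unfold compactness
  have hin : ∀ (acc i : Int), i ∈ PySem.List.pyRange 0 (PySem.List.len snake) 1 →
      ((PySem.List.pyRange (i + 1) (PySem.List.len snake) 1).foldl (fun acc2 j =>
        if adjCond (PySem.List.pyGetD snake i (0, 0)) (PySem.List.pyGetD snake j (0, 0))
        then acc2 + 1 else acc2) acc)
      = acc + (((snake.drop (i + 1).toNat).countP
          (fun b => adjCond (PySem.List.pyGetD snake i (0, 0)) b) : Nat) : Int) := by
    intro acc i hi
    have h0 : (0:Int) ≤ i + 1 := by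
      have := (PySem.List.mem_pyRange_one.1 hi).1; omega
    rw [PySem.List.foldl_pyRange_pyGetD (ha := h0)
      (f := fun acc2 b => if adjCond (PySem.List.pyGetD snake i (0,0)) b then acc2 + 1 else acc2),
      PySem.List.foldl_if_add_one]
  have h1 := PySem.List.foldl_congr_mem _ _ _ (0:Int) (fun acc i hi => hin acc i hi)
  rw [h1, PySem.List.foldl_add]
  simp only [PySem.List.len_eq]
  rw [PySem.List.pyRange_zero_natCast, List.map_map]
  have hc : ∀ k ∈ List.range snake.length,
      ((fun i => (((snake.drop (i + 1).toNat).countP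
          (fun b => adjCond (PySem.List.pyGetD snake i (0, 0)) b) : Nat) : Int)) ∘ (fun k : Nat => (k : Int))) k
      = (fun k => (((snake.drop (k + 1)).countP
          (fun b => adjCond (snake.getD k (0, 0)) b) : Nat) : Int)) k := by
    intro k hk
    simp only [Function.comp_def, PySem.List.pyGetD_natCast]
    norm_num
  rw [List.map_congr_left hc, sumIdx]
  ring

-- summing 'if c = a then v c else 0' over a duplicate-free list containing a gives v a
theorem sum_if_eq {α : Type} [DecidableEq α] (d : List α) (hd : d.Nodup) (a : α) (ha : a ∈ d)
    (v : α → Int) : (d.map (fun c => if c = a then v c else 0)).sum = v a := by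
  induction d with
  | nil => simp at ha
  | cons b t ih =>
    rcases List.mem_cons.1 ha with h | h
    · subst h
      have hz : ∀ c ∈ t, (if c = a then v c else 0) = 0 := by
        intro c hc
        have : c ≠ a := fun e => (List.nodup_cons.1 hd).1 (e ▸ hc)
        simp [this]
      rw [List.map_cons, List.sum_cons, if_pos rfl, List.map_congr_left hz]
      simp
    · have hb : b ≠ a := fun e => (List.nodup_cons.1 hd).1 (e ▸ h)
      simp [hb, ih (List.nodup_cons.1 hd).2 h]

-- grouping: a sum of g over xs equals the count-weighted sum of g over any Nodup cover
theorem group_sum {α : Type} [BEq α] [LawfulBEq α] [DecidableEq α]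
    (d : List α) (hd : d.Nodup) :
    ∀ (xs : List α), (∀ x ∈ xs, x ∈ d) → ∀ (g : α → Int),
      (d.map (fun c => (xs.count c : Int) * g c)).sum = (xs.map g).sum := by
  intro xs
  induction xs with
  | nil => simp
  | cons a t ih =>
    intro h g
    have hmem : ∀ x ∈ t, x ∈ d := fun x hx => h x (List.mem_cons_of_mem a hx)
    have key : ∀ c ∈ d, ((a :: t).count c : Int) * g c
        = (t.count c : Int) * g c + (if c = a then g c else 0) := by
      intro c hc
      rw [List.count_cons]
      by_cases hca : c = a
      · subst hca; simp; ring
      · have h2 : a ≠ c := Ne.symm hca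
        simp [hca, h2]
    rw [List.map_congr_left key]
    rw [show (fun c => (t.count c : Int) * g c + (if c = a then g c else 0))
        = (fun c => (fun c => (t.count c : Int) * g c) c + (fun c => if c = a then g c else 0) c) from rfl,
      PySem.List.sum_map_add_int, ih hmem g, sum_if_eq d hd a (h a (List.mem_cons_self)) g]
    simp only [List.map_cons, List.sum_cons]
    ring

theorem count_eq_countP_beq {α : Type} [BEq α] (l : List α) (v : α) :
    l.count v = l.countP (fun x => x == v) := rfl

-- summing right- and up-neighbour counts over all cells equals the unordered pair count
theorem final_sum (xs : List (Int × Int)) :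
    (xs.map (fun x => ((xs.count (rC x) : Int) + (xs.count (uC x) : Int)))).sum
      = (pairSum xs : Int) := by
  induction xs with
  | nil => simp [pairSum]
  | cons a t ih =>
    have hra : ((a == rC a) : Bool) = false := by
      simp [rC, Prod.ext_iff]
    have hua : ((a == uC a) : Bool) = false := by
      simp [uC, Prod.ext_iff]
    rw [List.map_cons, List.sum_cons]
    have hkey : ∀ x ∈ t,
        (((a :: t).count (rC x) : Int) + ((a :: t).count (uC x) : Int))
        = ((fun x => ((t.count (rC x) : Int) + (t.count (uC x) : Int))) x
            + (fun x => (((if a == rC x then 1 else 0) : Int) + ((if a == uC x then 1 else 0) : Int))) x) := by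
      intro x hx
      simp only [List.count_cons]
      push_cast
      ring
    rw [List.map_congr_left hkey, PySem.List.sum_map_add_int, ih]
    rw [show (fun x => (((if a == rC x then 1 else 0) : Int) + ((if a == uC x then 1 else 0) : Int)))
        = (fun x => ((fun x => if ((a == rC x) : Bool) then (1:Int) else 0) x + (fun x => if ((a == uC x) : Bool) then (1:Int) else 0) x)) from rfl,
      PySem.List.sum_map_add_int, PySem.List.sum_map_ite_one_zero, PySem.List.sum_map_ite_one_zero]
    have hl : t.countP (fun x => a == rC x) = t.count (lC a) := by
      rw [count_eq_countP_beq]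
      apply List.countP_congr
      intro x hx
      simp only [rC, lC, beq_iff_eq, Prod.ext_iff]
      constructor <;> (intro h; constructor <;> omega)
    have hu : t.countP (fun x => a == uC x) = t.count (dC a) := by
      rw [count_eq_countP_beq]
      apply List.countP_congr
      intro x hx
      simp only [uC, dC, beq_iff_eq, Prod.ext_iff]
      constructor <;> (intro h; constructor <;> omega)
    rw [hl, hu, List.count_cons, List.count_cons, hra, hua]
    simp only [pairSum, countP_adj]
    push_cast
    ring

-- B's counter pass and grouped sum compute the count-weighted neighbour sum
theorem B_eq (snake : List (Int × Int)) :
    compactness_alt snake =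
      -(((PySem.Set.ofList snake).map (fun c =>
          (snake.count c : Int) * ((snake.count (rC c) : Int) + (snake.count (uC c) : Int)))).sum) := by
  unfold compactness_alt
  dsimp only
  rw [PySem.Dict.foldl_insert_getD_add_one_eq_counter, PySem.Dict.items_counter, List.foldl_map]
  rw [PySem.List.foldl_add _ (fun k =>
      ((snake.count k : Int) * (PySem.Dict.counter snake).getD (k.1 + 1, k.2) 0
        + (snake.count k : Int) * (PySem.Dict.counter snake).getD (k.1, k.2 + 1) 0))]
  rw [zero_add, neg_inj]
  apply congrArg
  apply List.map_congr_left
  intro c hc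
  simp only [PySem.Dict.getD_counter, rC, uC]
  ring

-- ===== VERDICT (by name: the statement is the Claim_ definition above) =====
theorem compactness_spec : Claim_equal_compactness := by
  intro snake _
  unfold Spec_compactness
  rw [A_eq, B_eq, ← final_sum snake, ← group_sum (PySem.Set.ofList snake)
    (PySem.Set.nodup_ofList snake) snake (fun x hx => (PySem.Set.mem_ofList snake x).2 hx)
    (fun x => ((snake.count (rC x) : Int) + (snake.count (uC x) : Int)))]
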